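-- pv_equiv track=rewrite | github.com/leocfig/FP-22-23 | Project-1/Projeto.py | insere_espacos
-- ===== SOURCE A (Python) =====
-- def insere_espacos(cadeia, largura):
--     """
--     cad. carateres x inteiro → cad. carateres
--     recebe uma cadeia e um valor da largura e insere espacos
--     ate' a cadeia ter o comprimento da largura
--     """
--
--     largura_atual = 0
--     if ' ' in cadeia: #se a cadeia de entrada conter duas ou mais palavras
--         lista_cadeia = cadeia.split()
--         for i in lista_cadeia:
--             largura_atual += len(i)
--             #calcular a soma do comprimento das palavras sem espacos entre elas
--         while largura_atual < largura:
--             for i in range(len(lista_cadeia) - 1):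
--                 #len - 1 para nao ser inserido o espaco na ultima palavra
--                 lista_cadeia[i] = lista_cadeia[i] + ' '
--                 largura_atual += 1
--                 if largura_atual == largura:
--                     break
--         cadeia = ''
--         for palavra in lista_cadeia:
--             cadeia = cadeia + palavra
--             #concatenar as palavras com os espacos numa frase
--
--     else: #se a cadeia de entrada conter apenas uma palavra
--         cadeia = cadeia + ' ' * (largura - len(cadeia))
--
--     return cadeia
-- ===== SOURCE B (Python) =====
-- def insere_espacos(cadeia, largura):
--     if ' ' in cadeia:
--         palavras = cadeia.split()
--         total = largura - sum(len(p) for p in palavras)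
--         if total < 0:
--             total = 0
--         gaps = len(palavras) - 1
--         if gaps >= 1:
--             base, resto = divmod(total, gaps)
--             return ''.join(
--                 p + ' ' * (base + (1 if i < resto else 0))
--                 for i, p in enumerate(palavras[:-1])
--             ) + palavras[-1]
--         return ''.join(palavras)
--     return cadeia + ' ' * (largura - len(cadeia))
-- ===== Notes on version B (the rewrite author's own statement) =====
-- stated objective: simpler
-- what changed: Replaces A's round-robin while/for loop that appends single spaces word by word with a closed-form divmod computation of each gap's space count and a single join, keeping A's branch structure (clamping the space total at 0 reproduces A's no-separator output when the width is too small).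
import Mathlib
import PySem

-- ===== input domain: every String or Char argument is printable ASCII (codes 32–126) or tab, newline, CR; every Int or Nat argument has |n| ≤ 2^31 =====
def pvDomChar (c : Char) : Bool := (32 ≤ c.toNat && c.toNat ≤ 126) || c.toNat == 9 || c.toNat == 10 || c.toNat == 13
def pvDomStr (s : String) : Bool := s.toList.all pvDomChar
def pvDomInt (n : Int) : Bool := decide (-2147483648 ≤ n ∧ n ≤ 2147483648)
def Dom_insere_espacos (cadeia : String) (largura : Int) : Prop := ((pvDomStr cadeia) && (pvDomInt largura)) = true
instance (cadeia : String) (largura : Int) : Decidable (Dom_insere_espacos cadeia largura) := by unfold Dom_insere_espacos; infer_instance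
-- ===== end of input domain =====

-- B replaces A's round-robin while/for space-insertion loop by a closed-form divmod distribution
-- (base+1 spaces after each of the first `rem` gaps, base after the rest) built with a single join.

-- ' ' * n  (n.toNat clamps a negative count to 0, as Python's string repetition does)
def pvSpaces : Nat → String
  | 0 => ""
  | n + 1 => pvSpaces n ++ " "

-- ===== PORT A =====
-- the inner 'for i in range(len(lista)-1)' with its break on largura_atual == largura
def pvInnerA : List Int → List String → Int → Int → List String × Int
  | [], lst, cur, _ => (lst, cur)
  | i :: rest, lst, cur, larg =>
    let lst' := lst.set i.toNat ((lst.getD i.toNat "") ++ " ")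
    if cur + 1 = larg then (lst', cur + 1) else pvInnerA rest lst' (cur + 1) larg

-- the outer 'while largura_atual < largura'; the fuel (largura - largura_atual).toNat is only a
-- termination guard: inside Pre_ the loop makes at least one step of progress per pass, so the
-- fuel is never exhausted before the while-condition turns false (outside Pre_ Python diverges).
def pvOuterA : Nat → List String → Int → Int → List String
  | 0, lst, _, _ => lst
  | fuel + 1, lst, cur, larg =>
    if cur < larg then
      let p := pvInnerA (PySem.List.pyRange 0 ((lst.length : Int) - 1) 1) lst cur larg
      pvOuterA fuel p.1 p.2 larg
    else lst

def insere_espacos (cadeia : String) (largura : Int) : String :=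
  if PySem.Str.isIn " " cadeia then
    let lista := PySem.Str.split₀ cadeia
    let atual := lista.foldl (fun acc w => acc + PySem.Str.len w) (0 : Int)
    let final := pvOuterA (largura - atual).toNat lista atual largura
    final.foldl (fun acc w => acc ++ w) ""
  else
    cadeia ++ pvSpaces (largura - PySem.Str.len cadeia).toNat

-- ===== PORT B =====
def insere_espacos_alt (cadeia : String) (largura : Int) : String :=
  if PySem.Str.isIn " " cadeia then
    let palavras := PySem.Str.split₀ cadeia
    let total0 := largura - (palavras.map PySem.Str.len).sum
    let total := if total0 < 0 then (0 : Int) else total0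
    let gaps : Int := (palavras.length : Int) - 1
    if 1 ≤ gaps then
      match PySem.Int.divmod? total gaps with
      | some (base, resto) =>
          PySem.Str.join ""
            ((PySem.List.slice palavras none (some (-1))).mapIdx
              (fun i p => p ++ pvSpaces (base + (if (i : Int) < resto then 1 else 0)).toNat))
          ++ PySem.List.pyGetD palavras (-1) ""
      | none => ""   -- unreachable: gaps ≥ 1 so divmod? is some
    else PySem.Str.join "" palavras
  else
    cadeia ++ pvSpaces (largura - PySem.Str.len cadeia).toNat

-- ===== PRECONDITION & SPEC =====
-- Pre_ excludes exactly the inputs on which A's while-loop never terminates (Python hangs):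
-- cadeia contains a space yet splits into at most one word, while the word lengths sum below largura.
def Pre_insere_espacos (cadeia : String) (largura : Int) : Prop :=
  PySem.Str.isIn " " cadeia = true →
    ((PySem.Str.split₀ cadeia).map PySem.Str.len).sum < largura →
    2 ≤ (PySem.Str.split₀ cadeia).length
instance (cadeia : String) (largura : Int) : Decidable (Pre_insere_espacos cadeia largura) := by
  unfold Pre_insere_espacos; infer_instance

def pvWitness_insere_espacos : String × Int := ("ab cd e", 12)

def Spec_insere_espacos (cadeia : String) (largura : Int) (out : String) : Prop := out = insere_espacos_alt cadeia largura
instance (cadeia : String) (largura : Int) (out : String) : Decidable (Spec_insere_espacos cadeia largura out) := by unfold Spec_insere_espacos; infer_instance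

-- ===== CLAIM (what is proved, stated in full; the proofs are below) =====
def Claim_equal_insere_espacos : Prop := ∀ (cadeia : String) (largura : Int), Dom_insere_espacos cadeia largura → Pre_insere_espacos cadeia largura → Spec_insere_espacos cadeia largura (insere_espacos cadeia largura)

-- ===== LEMMAS AND PROOFS =====

lemma pvSpaces_succ_left (n : Nat) : pvSpaces (n + 1) = " " ++ pvSpaces n := by
  induction n with
  | zero => rfl
  | succ n ih =>
    show pvSpaces (n + 1) ++ " " = " " ++ (pvSpaces n ++ " ")
    rw [ih, String.append_assoc]

lemma pv_mapIdx_eq_self {α : Type} (l : List α) (f : Nat → α → α)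
    (h : ∀ (i : Nat) (hi : i < l.length), f i l[i] = l[i]) : l.mapIdx f = l := by
  apply List.ext_getElem (by simp)
  intro i h1 h2
  simp only [List.getElem_mapIdx]
  exact h i h2

-- ''.join(parts) is the same string as the left fold of ++ over parts
lemma pv_join_empty_eq_foldl (parts : List String) :
    PySem.Str.join "" parts = parts.foldl (fun a w => a ++ w) "" := by
  apply String.toList_inj.mp
  rw [PySem.Str.toList_join, show ("" : String).toList = ([] : List Char) from rfl]
  have hfold : ∀ (ps : List String) (acc : String),
      (ps.foldl (fun a w => a ++ w) acc).toList = acc.toList ++ (ps.map String.toList).flatten := by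
    intro ps
    induction ps with
    | nil => intro acc; simp
    | cons p rest ih => intro acc; simp [ih, String.toList_append]
  rw [hfold, show ("" : String).toList = ([] : List Char) from rfl]
  have hjoin : ∀ (ls : List (List Char)), PySem.Chars.join [] ls = ls.flatten := by
    intro ls
    induction ls with
    | nil => simp [PySem.Chars.join_nil]
    | cons p rest ih =>
      cases rest with
      | nil => simp [PySem.Chars.join, List.intercalate]
      | cons q r => rw [PySem.Chars.join_cons_cons, ih]; simp
  rw [hjoin]
  exact (List.nil_append _).symm

-- xs[:-1] = dropLast for nonempty xs
lemma pv_slice_neg_one {α : Type} (l : List α) (h : l ≠ []) :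
    PySem.List.slice l none (some (-1)) = l.dropLast := by
  simp only [PySem.List.slice, PySem.List.clampIdx, List.drop_zero]
  rw [List.dropLast_eq_take]
  congr 1
  have h1 : 0 < l.length := List.length_pos_iff.mpr h
  split_ifs <;> omega

-- number of spaces A's round robin puts after word i when t spaces are distributed over g gaps
def pvCnt (g t i : Nat) : Nat := if i < g then t / g + (if i < t % g then 1 else 0) else 0

-- one inner pass starting at gap j appends a space to gaps j … j+d-1, d = min (remaining gaps) (remaining spaces)
lemma pvInnerA_char (g : Nat) (larg : Int) :
    ∀ (n j : Nat) (lst : List String) (cur : Int), j + n = g → lst.length = g + 1 → cur < larg →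
    pvInnerA (PySem.List.pyRange j g 1) lst cur larg =
      (lst.mapIdx (fun i w => if j ≤ i ∧ i < j + min n (larg - cur).toNat then w ++ " " else w),
       cur + min n (larg - cur).toNat) := by
  intro n
  induction n with
  | zero =>
    intro j lst cur hj hlen hcur
    have hje : (j : Int) = (g : Int) := by omega
    rw [hje]
    rw [show PySem.List.pyRange (g : Int) (g : Int) 1 = [] by
      simp [PySem.List.pyRange]]
    simp only [pvInnerA, Nat.zero_min, Prod.mk.injEq]
    constructor
    · rw [pv_mapIdx_eq_self]
      intro i hi
      simp only [Nat.add_zero]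
      rw [if_neg (by omega)]
    · omega
  | succ n ih =>
    intro j lst cur hj hlen hcur
    have hjg : (j : Int) < (g : Int) := by omega
    rw [PySem.List.pyRange_one_cons hjg]
    simp only [pvInnerA]
    have hjcast : ((j : Int) + 1) = ((j + 1 : Nat) : Int) := by push_cast; ring
    have hjn : (j : Int).toNat = j := by omega
    have hjl : j < lst.length := by omega
    have hset : lst.set j ((lst.getD j "") ++ " ")
        = lst.mapIdx (fun i w => if i = j then w ++ " " else w) := by
      apply List.ext_getElem (by simp)
      intro i h1 h2
      simp only [List.getElem_mapIdx, List.getElem_set]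
      by_cases hij : i = j
      · subst hij; simp [List.getD_eq_getElem?_getD, List.getElem?_eq_getElem hjl]
      · simp [hij, Ne.symm hij]
    rw [hjn, hset]
    by_cases hbreak : cur + 1 = larg
    · rw [if_pos hbreak]
      have ht1 : (larg - cur).toNat = 1 := by omega
      rw [ht1]
      simp only [Prod.mk.injEq]
      constructor
      · apply List.ext_getElem (by simp)
        intro i h1 h2
        simp only [List.getElem_mapIdx]
        by_cases hij : i = j
        · subst hij; rw [if_pos rfl, if_pos (by omega)]
        · rw [if_neg hij, if_neg (by omega)]
      · omega
    · rw [if_neg hbreak]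
      have hcur' : cur + 1 < larg := by omega
      rw [hjcast, ih (j + 1) _ (cur + 1) (by omega) (by simp [hlen]) hcur']
      have hT : 2 ≤ (larg - cur).toNat := by omega
      have hd : min (n + 1) (larg - cur).toNat = min n (larg - (cur + 1)).toNat + 1 := by omega
      simp only [Prod.mk.injEq]
      constructor
      · rw [List.mapIdx_mapIdx]
        apply List.ext_getElem (by simp)
        intro i h1 h2
        simp only [List.getElem_mapIdx, Function.comp]
        by_cases hij : i = j
        · subst hij
          rw [if_pos rfl, if_neg (by omega), if_pos (by omega)]
        · rw [if_neg hij]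
          by_cases hmid : j + 1 ≤ i ∧ i < j + 1 + min n (larg - (cur + 1)).toNat
          · rw [if_pos hmid, if_pos (by omega)]
          · rw [if_neg hmid, if_neg (by omega)]
      · omega

-- one pass adds one space to the first d = min g t gaps and leaves t - d spaces to distribute
lemma pvCnt_step (g t d i : Nat) (hg : 1 ≤ g) (hd : d = min g t) :
    pvCnt g t i = pvCnt g (t - d) i + (if 0 ≤ i ∧ i < 0 + d then 1 else 0) := by
  simp only [pvCnt]
  by_cases hig : i < g
  · rw [if_pos hig, if_pos hig]
    by_cases htg : t ≤ g
    · have hdt : d = t := by omega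
      have hzero : t - d = 0 := by omega
      rw [hzero]
      simp only [Nat.zero_div, Nat.zero_mod]
      rcases Nat.lt_or_ge t g with hlt | hge
      · have h1 : t / g = 0 := Nat.div_eq_of_lt hlt
        have h2 : t % g = t := Nat.mod_eq_of_lt hlt
        split_ifs <;> omega
      · have htg' : t = g := by omega
        have h1 : t / g = 1 := by rw [htg']; exact Nat.div_self (by omega)
        have h2 : t % g = 0 := by rw [htg']; exact Nat.mod_self g
        split_ifs <;> omega
    · have hdg : d = g := by omega
      have hteq : t = (t - d) + g := by omega
      have h1 : t / g = (t - d) / g + 1 := by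
        conv_lhs => rw [hteq]
        exact Nat.add_div_right _ (by omega)
      have h2 : t % g = (t - d) % g := by
        conv_lhs => rw [hteq]
        exact Nat.add_mod_right _ _
      split_ifs <;> omega
  · rw [if_neg hig, if_neg hig]
    rw [if_neg (show ¬ (0 ≤ i ∧ i < 0 + d) by omega)]

-- the whole while-loop: word i ends up with pvCnt g t i extra spaces, t = (larg - cur).toNat
lemma pvOuterA_char (g : Nat) (larg : Int) (hg : 1 ≤ g) :
    ∀ (fuel : Nat) (lst : List String) (cur : Int), lst.length = g + 1 → (larg - cur).toNat ≤ fuel →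
    pvOuterA fuel lst cur larg
      = lst.mapIdx (fun i w => w ++ pvSpaces (pvCnt g (larg - cur).toNat i)) := by
  intro fuel
  induction fuel with
  | zero =>
    intro lst cur hlen hfu
    have ht : (larg - cur).toNat = 0 := by omega
    rw [ht]
    simp only [pvOuterA]
    rw [pv_mapIdx_eq_self]
    intro i hi
    simp [pvCnt, String.append_empty, pvSpaces]
  | succ fuel ih =>
    intro lst cur hlen hfu
    simp only [pvOuterA]
    by_cases hcur : cur < larg
    · rw [if_pos hcur]
      have hlen' : ((lst.length : Int) - 1) = (g : Int) := by omega
      rw [hlen']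
      have hinner := pvInnerA_char g larg g 0 lst cur (by omega) hlen hcur
      rw [show ((0 : Nat) : Int) = (0 : Int) by simp] at hinner
      rw [hinner]
      have hd1 : 1 ≤ min g (larg - cur).toNat := by omega
      have hlen2 : (lst.mapIdx (fun i w => if 0 ≤ i ∧ i < 0 + min g (larg - cur).toNat then w ++ " " else w)).length = g + 1 := by
        simp [hlen]
      have hcurEq : (larg - (cur + ((min g (larg - cur).toNat : Nat) : Int))).toNat
          = (larg - cur).toNat - min g (larg - cur).toNat := by omega
      rw [ih _ _ hlen2 (by omega), hcurEq, List.mapIdx_mapIdx]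
      apply List.ext_getElem (by simp)
      intro i h1 h2
      simp only [List.getElem_mapIdx, Function.comp]
      have hkey := pvCnt_step g (larg - cur).toNat (min g (larg - cur).toNat) i hg rfl
      by_cases hid : 0 ≤ i ∧ i < 0 + min g (larg - cur).toNat
      · rw [if_pos hid, hkey, if_pos hid, pvSpaces_succ_left, ← String.append_assoc]
      · rw [if_neg hid, hkey, if_neg hid]
        norm_num
    · rw [if_neg hcur]
      have ht : (larg - cur).toNat = 0 := by omega
      rw [ht, pv_mapIdx_eq_self]
      intro i hi
      simp [pvCnt, String.append_empty, pvSpaces]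

-- concatenating a list with its last word split off
lemma pv_foldl_append_last (xs : List String) (y : String) :
    (xs ++ [y]).foldl (fun a w => a ++ w) "" = xs.foldl (fun a w => a ++ w) "" ++ y := by
  rw [List.foldl_append]
  rfl

-- ===== VERDICT (by name: the statement is the Claim_ definition above) =====

theorem insere_espacos_spec : Claim_equal_insere_espacos := by
  intro cadeia largura _hdom hpre
  unfold Spec_insere_espacos insere_espacos insere_espacos_alt
  dsimp only
  by_cases hin : PySem.Str.isIn " " cadeia
  · rw [if_pos hin, if_pos hin]
    set ws := PySem.Str.split₀ cadeia with hws
    have hsum : ws.foldl (fun acc w => acc + PySem.Str.len w) (0 : Int)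
        = (ws.map PySem.Str.len).sum := by
      rw [PySem.List.foldl_add]; ring
    rw [hsum]
    set S : Int := (ws.map PySem.Str.len).sum with hS
    by_cases hgaps : 1 ≤ (ws.length : Int) - 1
    · -- at least two words
      rw [if_pos hgaps]
      have hws2 : 2 ≤ ws.length := by omega
      set g : Nat := ws.length - 1 with hgdef
      have hg1 : 1 ≤ g := by omega
      have hlen : ws.length = g + 1 := by omega
      have hne : ws ≠ [] := by intro h; rw [h] at hws2; simp at hws2
      -- the distributed total, clamped at 0
      set t : Nat := (largura - S).toNat with htdef
      have htotal : (if largura - S < 0 then (0 : Int) else largura - S) = (t : Nat) := by omega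
      rw [htotal]
      have hgcast : ((ws.length : Int) - 1) = ((g : Nat) : Int) := by omega
      rw [hgcast]
      have hdm : PySem.Int.divmod? (t : Int) (g : Int) = some (((t / g : Nat) : Int), ((t % g : Nat) : Int)) := by
        simp [PySem.Int.divmod?, Int.fdiv_eq_ediv, Int.fmod_eq_emod]
        omega
      rw [hdm]
      dsimp only
      -- A's loop result
      rw [pvOuterA_char g largura hg1 _ ws S hlen (by omega)]
      -- split ws as dropLast ++ [last]
      have hsplitws : ws = ws.dropLast ++ [ws.getLast hne] := (List.dropLast_append_getLast hne).symm
      have hdlen : ws.dropLast.length = g := by simp [hlen]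
      -- B's pieces
      rw [pv_slice_neg_one ws hne]
      rw [PySem.List.pyGetD_neg_ofNat ws 1 "" (by omega) (by omega)]
      rw [pv_join_empty_eq_foldl]
      conv_lhs => rw [hsplitws]
      rw [List.mapIdx_append]
      simp only [List.mapIdx_cons, List.mapIdx_nil]
      rw [pv_foldl_append_last, ← htdef]
      congr 1
      · -- the dropLast parts coincide
        congr 1
        apply List.ext_getElem (by simp)
        intro i h1 h2
        simp only [List.getElem_mapIdx]
        congr 1
        have hig : i < g := by simpa [hdlen] using h2
        simp only [pvCnt, if_pos hig]
        congr 1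
        have hcast1 : (((t / g : Nat) : Int) + (if (i : Int) < ((t % g : Nat) : Int) then 1 else 0)).toNat
            = t / g + (if i < t % g then 1 else 0) := by
          by_cases hmi : i < t % g
          · rw [if_pos (by exact_mod_cast hmi), if_pos hmi]
            generalize (t / g : Nat) = q
            omega
          · rw [if_neg (by exact_mod_cast hmi), if_neg hmi]
            generalize (t / g : Nat) = q
            omega
        rw [hcast1]
      · -- the last word gets no spaces on either side
        have hz : pvCnt g t (0 + ws.dropLast.length) = 0 := by
          simp only [pvCnt, hdlen]
          rw [if_neg (by omega)]
        rw [hz]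
        show ws.getLast hne ++ pvSpaces 0 = ws[ws.length - 1]
        rw [show pvSpaces 0 = "" from rfl, String.append_empty, List.getLast_eq_getElem]
    · -- zero or one word: Pre_ forces largura ≤ S, the loop does not run
      rw [if_neg hgaps]
      have hS_ge : largura ≤ S := by
        by_contra hlt
        have h2 := hpre hin (by rw [← hws]; omega)
        rw [← hws] at h2
        omega
      have ht0 : (largura - S).toNat = 0 := by omega
      rw [ht0]
      simp only [pvOuterA]
      rw [pv_join_empty_eq_foldl]
  · rw [if_neg hin, if_neg hin]
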